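-- pv_equiv track=rewrite | github.com/kojioku/abmptools | abmptools/udfcreate.py | getbatff
-- ===== SOURCE A (Python) =====
-- def getbatff(ffname,bond):
--     fff=[]
--     #print "bond",bond
--     #print "ffname",ffname
--     for i in range(len(bond)):
--         dbuf=[]
--         for j in range(len(bond[i])):
--             for k in range(len(ffname)):
--                 if bond[i][j] == ffname[k][0]:
--                     #print ffname[k][1]
--                     dbuf.append(ffname[k][1])
--         fff.append(dbuf)
--     #print "fff",fff
--     return fff
-- ===== SOURCE B (Python) =====
-- def getbatff(ffname, bond):
--     # Transposed traversal: start from one empty bucket per bond atom, loop over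
--     # ffname scattering each value into every matching bucket, then flatten rows.
--     buckets = [[[] for _ in row] for row in bond]
--     for key, val in ffname:
--         buckets = [[cell + ([val] if atom == key else [])
--                     for cell, atom in zip(brow, row)]
--                    for brow, row in zip(buckets, bond)]
--     return [[v for cell in brow for v in cell] for brow in buckets]
-- ===== Notes on version B (the rewrite author's own statement) =====
-- stated objective: alternative
-- what changed: Inverts the traversal: instead of scanning ffname for every bond atom, B keeps a bucket per atom position and makes one outer pass over ffname, scattering each value into all matching buckets, flattening the buckets row-wise at the end.
import Mathlib
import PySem

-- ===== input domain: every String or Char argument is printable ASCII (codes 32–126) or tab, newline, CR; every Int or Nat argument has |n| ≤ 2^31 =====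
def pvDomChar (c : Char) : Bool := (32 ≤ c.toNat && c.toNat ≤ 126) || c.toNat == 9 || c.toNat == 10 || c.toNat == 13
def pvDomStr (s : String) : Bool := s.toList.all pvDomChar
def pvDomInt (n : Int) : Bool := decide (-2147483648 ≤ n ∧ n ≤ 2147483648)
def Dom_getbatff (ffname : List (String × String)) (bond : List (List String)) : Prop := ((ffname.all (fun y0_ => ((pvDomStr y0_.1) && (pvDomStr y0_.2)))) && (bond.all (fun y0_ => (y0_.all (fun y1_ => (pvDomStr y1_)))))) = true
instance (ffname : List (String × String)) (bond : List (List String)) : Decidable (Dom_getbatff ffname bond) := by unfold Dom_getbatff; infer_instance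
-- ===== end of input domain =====

-- B inverts the traversal: one outer pass over ffname scattering values into per-atom buckets; objective: alternative (same cost, different algorithmic structure).

-- ===== PORT A =====
def getbatff (ffname : List (String × String)) (bond : List (List String)) : List (List String) :=
  (PySem.List.pyRange 0 (PySem.List.len bond)).foldl (fun fff i =>
    let dbuf :=
      (PySem.List.pyRange 0 (PySem.List.len (PySem.List.pyGetD bond i []))).foldl (fun dbuf j =>
        (PySem.List.pyRange 0 (PySem.List.len ffname)).foldl (fun dbuf k =>
          if PySem.List.pyGetD (PySem.List.pyGetD bond i []) j "" ==
             (PySem.List.pyGetD ffname k ("", "")).1 then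
            dbuf ++ [(PySem.List.pyGetD ffname k ("", "")).2]
          else dbuf) dbuf) []
    fff ++ [dbuf]) []

-- ===== PORT B =====
-- zip in Source B always pairs equal-length lists (buckets keeps bond's shape), so List.zip is exact
def getbatff_alt (ffname : List (String × String)) (bond : List (List String)) : List (List String) :=
  let buckets0 := bond.map (fun row => row.map (fun _ => ([] : List String)))
  let buckets := ffname.foldl (fun b p =>
      (b.zip bond).map (fun rr =>
        (rr.1.zip rr.2).map (fun ca => ca.1 ++ (if ca.2 == p.1 then [p.2] else [])))) buckets0
  buckets.map (fun brow => brow.flatMap (fun cell => cell))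

-- ===== PRECONDITION & SPEC =====
def Spec_getbatff (ffname : List (String × String)) (bond : List (List String)) (out : List (List String)) : Prop := out = getbatff_alt ffname bond
instance (ffname : List (String × String)) (bond : List (List String)) (out : List (List String)) : Decidable (Spec_getbatff ffname bond out) := by unfold Spec_getbatff; infer_instance

-- ===== CLAIM (what is proved, stated in full; the proofs are below) =====
def Claim_equal_getbatff : Prop := ∀ (ffname : List (String × String)) (bond : List (List String)), Dom_getbatff ffname bond → Spec_getbatff ffname bond (getbatff ffname bond)

-- ===== LEMMAS AND PROOFS =====

-- a fold over range(len(xs)) reading xs[i] is a fold over xs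
theorem foldl_pyRange_len {α β : Type} (xs : List α) (d : α) (g : β → α → β) (init : β) :
    (PySem.List.pyRange 0 (PySem.List.len xs)).foldl (fun acc i => g acc (PySem.List.pyGetD xs i d)) init
      = xs.foldl g init := by
  conv_rhs => rw [← PySem.List.map_pyGetD_pyRange_zero xs d, List.foldl_map]

-- A's inner k-loop collects, in ffname order, the values whose key equals the atom
theorem inner_loop_eq (ffname : List (String × String)) (a : String) (acc : List String) :
    (PySem.List.pyRange 0 (PySem.List.len ffname)).foldl (fun dbuf k =>
        if a == (PySem.List.pyGetD ffname k ("", "")).1 then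
          dbuf ++ [(PySem.List.pyGetD ffname k ("", "")).2]
        else dbuf) acc
      = acc ++ ((ffname.filter (fun p => p.1 == a)).map (fun p => p.2)) := by
  rw [foldl_pyRange_len ffname ("", "")
      (fun dbuf p => if a == p.1 then dbuf ++ [p.2] else dbuf) acc]
  rw [PySem.List.foldl_append_if (fun p => a == p.1) (fun p => p.2) ffname acc]
  have : ffname.filter (fun p => a == p.1) = ffname.filter (fun p => p.1 == a) := by
    apply List.filter_congr; intro p _; simp [eq_comm]
  rw [this]

-- A computes, per row, the concatenation over atoms of the matching ffname values
theorem getbatff_eq_spec (ffname : List (String × String)) (bond : List (List String)) :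
    getbatff ffname bond
      = bond.map (fun row => row.flatMap (fun a => (ffname.filter (fun p => p.1 == a)).map (fun p => p.2))) := by
  unfold getbatff
  rw [foldl_pyRange_len bond []
      (fun fff row =>
        fff ++ [(PySem.List.pyRange 0 (PySem.List.len row)).foldl (fun dbuf j =>
          (PySem.List.pyRange 0 (PySem.List.len ffname)).foldl (fun dbuf k =>
            if PySem.List.pyGetD row j "" == (PySem.List.pyGetD ffname k ("", "")).1 then
              dbuf ++ [(PySem.List.pyGetD ffname k ("", "")).2]
            else dbuf) dbuf) []]) []]
  rw [PySem.List.foldl_append_singleton_eq_map]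
  simp only [List.nil_append]
  apply List.map_congr_left
  intro row _
  rw [foldl_pyRange_len row ""
      (fun dbuf a =>
        (PySem.List.pyRange 0 (PySem.List.len ffname)).foldl (fun dbuf k =>
          if a == (PySem.List.pyGetD ffname k ("", "")).1 then
            dbuf ++ [(PySem.List.pyGetD ffname k ("", "")).2]
          else dbuf) dbuf) []]
  have h1 :
      row.foldl (fun dbuf a =>
        (PySem.List.pyRange 0 (PySem.List.len ffname)).foldl (fun dbuf k =>
          if a == (PySem.List.pyGetD ffname k ("", "")).1 then
            dbuf ++ [(PySem.List.pyGetD ffname k ("", "")).2]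
          else dbuf) dbuf) []
        = row.foldl (fun dbuf a =>
            dbuf ++ ((ffname.filter (fun p => p.1 == a)).map (fun p => p.2))) [] :=
    PySem.List.foldl_congr_mem row _ _ _ (fun dbuf a _ => inner_loop_eq ffname a dbuf)
  rw [h1, PySem.List.foldl_append_eq_flatMap
        (fun a => (ffname.filter (fun p => p.1 == a)).map (fun p => p.2))]
  simp only [List.nil_append]

-- zipping a list with itself pairs each element with itself
theorem zip_self_eq_map {α : Type} (l : List α) : l.zip l = l.map (fun a => (a, a)) := by
  induction l with
  | nil => rfl
  | cons a l ih => simp [List.zip_cons_cons, ih]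

-- zipping a cellwise map of a nested list with the list itself, then mapping, is a cellwise map
theorem zip_map_self_step (bond : List (List String)) (g : String → List String)
    (h : String → List String → List String) :
    ((bond.map (fun row => row.map g)).zip bond).map (fun rr =>
        (rr.1.zip rr.2).map (fun ca => h ca.2 ca.1))
      = bond.map (fun row => row.map (fun a => h a (g a))) := by
  rw [List.zip_map_left, zip_self_eq_map, List.map_map, List.map_map]
  apply List.map_congr_left
  intro row _
  simp only [Function.comp, Prod.map, id_eq]
  rw [List.zip_map_left, zip_self_eq_map, List.map_map, List.map_map]
  rfl

-- B's fold over ffname accumulates, per bucket, the values matching that bucket's atom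
theorem scatter_fold (bond : List (List String)) (l : List (String × String)) :
    ∀ (g : String → List String),
    l.foldl (fun b p =>
        (b.zip bond).map (fun rr =>
          (rr.1.zip rr.2).map (fun ca => ca.1 ++ (if ca.2 == p.1 then [p.2] else []))))
      (bond.map (fun row => row.map g))
      = bond.map (fun row => row.map (fun a =>
          g a ++ ((l.filter (fun p => p.1 == a)).map (fun p => p.2)))) := by
  induction l with
  | nil => intro g; simp
  | cons p l ih =>
    intro g
    rw [List.foldl_cons,
        zip_map_self_step bond g (fun a cell => cell ++ (if a == p.1 then [p.2] else [])),
        ih (fun a => g a ++ (if a == p.1 then [p.2] else []))]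
    apply List.map_congr_left; intro row _
    apply List.map_congr_left; intro a _
    rw [List.filter_cons]
    by_cases hap : p.1 = a
    · simp [hap]
    · have h1 : (a == p.1) = false := by simp; exact fun e => hap e.symm
      have h2 : (p.1 == a) = false := by simp; exact hap
      simp [h1, h2]

-- ===== VERDICT (by name: the statement is the Claim_ definition above) =====
theorem getbatff_spec : Claim_equal_getbatff := by
  intro ffname bond _
  unfold Spec_getbatff
  rw [getbatff_eq_spec]
  have halt : getbatff_alt ffname bond =
      (ffname.foldl (fun b p =>
          (b.zip bond).map (fun rr =>
            (rr.1.zip rr.2).map (fun ca => ca.1 ++ (if ca.2 == p.1 then [p.2] else []))))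
        (bond.map (fun row => row.map (fun _ => ([] : List String))))).map
        (fun brow => brow.flatMap (fun cell => cell)) := rfl
  rw [halt, scatter_fold bond ffname (fun _ => [])]
  rw [List.map_map]
  apply List.map_congr_left
  intro row _
  simp only [Function.comp, List.nil_append]
  simp only [List.flatMap_def, List.map_map]
  rfl
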